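-- pv_equiv track=rewrite | github.com/giffel99/metabolism_prediction | src/data_analysis/data_analysis.py | curate_metxbiodb_for_enzyme_analysis
-- ===== SOURCE A (Python) =====
-- def curate_metxbiodb_for_enzyme_analysis(enzymes):
--     enzymes = ["CYP" if ("cyp" in enzyme) else enzyme for enzyme in enzymes]
--     enzymes = ["NAT" if ("nat" in enzyme) else enzyme for enzyme in enzymes]
--     enzymes = ["UGT" if ("ugt" in enzyme) else enzyme for enzyme in enzymes]
--     enzymes = ["GST" if ("gst" in enzyme) else enzyme for enzyme in enzymes]
--     enzymes = ["UDP" if ("udp" in enzyme) else enzyme for enzyme in enzymes]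
--     enzymes = ["SULT" if ("sult" in enzyme) else enzyme for enzyme in enzymes]
--     enzymes = ["COMT" if ("comt" in enzyme) else enzyme for enzyme in enzymes]
--     return enzymes
-- ===== SOURCE B (Python) =====
-- # One pass over the list driven by an ordered (substring, replacement) table; first match wins.
-- _RULES = [("cyp", "CYP"), ("nat", "NAT"), ("ugt", "UGT"), ("gst", "GST"),
--           ("udp", "UDP"), ("sult", "SULT"), ("comt", "COMT")]
--
-- def _normalize(enzyme):
--     for sub, rep in _RULES:
--         if sub in enzyme:
--             return rep
--     return enzyme
--
-- def curate_metxbiodb_for_enzyme_analysis(enzymes):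
--     return [_normalize(e) for e in enzymes]
-- ===== Notes on version B (the rewrite author's own statement) =====
-- stated objective: simpler
-- what changed: Replaced seven successive whole-list rebuild passes (one per enzyme family) with a single pass over the list driven by an ordered (substring, replacement) table with first-match-wins lookup.
import Mathlib
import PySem

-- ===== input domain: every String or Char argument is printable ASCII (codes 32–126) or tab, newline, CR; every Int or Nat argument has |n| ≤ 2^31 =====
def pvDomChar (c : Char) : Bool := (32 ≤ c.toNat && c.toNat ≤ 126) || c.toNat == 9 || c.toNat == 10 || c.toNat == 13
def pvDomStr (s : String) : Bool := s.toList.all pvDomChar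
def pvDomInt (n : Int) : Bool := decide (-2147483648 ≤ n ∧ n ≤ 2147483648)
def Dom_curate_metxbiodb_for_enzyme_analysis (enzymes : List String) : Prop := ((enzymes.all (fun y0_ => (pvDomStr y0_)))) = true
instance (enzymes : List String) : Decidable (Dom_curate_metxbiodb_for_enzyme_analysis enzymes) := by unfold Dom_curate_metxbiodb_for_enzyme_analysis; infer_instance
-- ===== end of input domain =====

-- B replaces A's seven successive whole-list passes with one pass driven by an ordered
-- (substring, replacement) table, first match wins (objective: simpler).


-- ===== PORT A =====
-- Seven list comprehensions, each rebuilding the whole list, exactly as in the Python.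
def curate_metxbiodb_for_enzyme_analysis (enzymes : List String) : List String :=
  let e1 := enzymes.map (fun e => if PySem.Str.isIn "cyp" e then "CYP" else e)
  let e2 := e1.map (fun e => if PySem.Str.isIn "nat" e then "NAT" else e)
  let e3 := e2.map (fun e => if PySem.Str.isIn "ugt" e then "UGT" else e)
  let e4 := e3.map (fun e => if PySem.Str.isIn "gst" e then "GST" else e)
  let e5 := e4.map (fun e => if PySem.Str.isIn "udp" e then "UDP" else e)
  let e6 := e5.map (fun e => if PySem.Str.isIn "sult" e then "SULT" else e)
  let e7 := e6.map (fun e => if PySem.Str.isIn "comt" e then "COMT" else e)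
  e7

-- ===== PORT B =====
def pvRules : List (String × String) :=
  [("cyp", "CYP"), ("nat", "NAT"), ("ugt", "UGT"), ("gst", "GST"),
   ("udp", "UDP"), ("sult", "SULT"), ("comt", "COMT")]

def pvNormalize (enzyme : String) : String :=
  match pvRules.find? (fun r => PySem.Str.isIn r.1 enzyme) with
  | some r => r.2
  | none => enzyme

def curate_metxbiodb_for_enzyme_analysis_alt (enzymes : List String) : List String :=
  enzymes.map pvNormalize

-- ===== PRECONDITION & SPEC =====
def Spec_curate_metxbiodb_for_enzyme_analysis (enzymes : List String) (out : List String) : Prop := out = curate_metxbiodb_for_enzyme_analysis_alt enzymes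
instance (enzymes : List String) (out : List String) : Decidable (Spec_curate_metxbiodb_for_enzyme_analysis enzymes out) := by unfold Spec_curate_metxbiodb_for_enzyme_analysis; infer_instance

-- ===== CLAIM (what is proved, stated in full; the proofs are below) =====
def Claim_equal_curate_metxbiodb_for_enzyme_analysis : Prop := ∀ (enzymes : List String), Dom_curate_metxbiodb_for_enzyme_analysis enzymes → Spec_curate_metxbiodb_for_enzyme_analysis enzymes (curate_metxbiodb_for_enzyme_analysis enzymes)

-- ===== LEMMAS AND PROOFS =====

-- one stage of A's pipeline, per element (proof-only helper)
def pvStage (sub rep e : String) : String := if PySem.Str.isIn sub e then rep else e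

-- Pointwise: A's seven stages chained on one string equal B's first-match lookup.
-- Once a stage fires the element is an uppercase literal no later lowercase pattern occurs in.
theorem pvPointwise (s : String) :
    pvStage "comt" "COMT" (pvStage "sult" "SULT" (pvStage "udp" "UDP" (pvStage "gst" "GST"
      (pvStage "ugt" "UGT" (pvStage "nat" "NAT" (pvStage "cyp" "CYP" s)))))) = pvNormalize s := by
  unfold pvStage pvNormalize pvRules
  by_cases h1 : PySem.Str.isIn "cyp" s = true
  · simp only [h1, List.find?, if_true]; rfl
  · simp only [Bool.not_eq_true] at h1
    by_cases h2 : PySem.Str.isIn "nat" s = true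
    · simp only [h1, h2, List.find?, if_true, Bool.false_eq_true, if_false]; rfl
    · simp only [Bool.not_eq_true] at h2
      by_cases h3 : PySem.Str.isIn "ugt" s = true
      · simp only [h1, h2, h3, List.find?, if_true, Bool.false_eq_true, if_false]; rfl
      · simp only [Bool.not_eq_true] at h3
        by_cases h4 : PySem.Str.isIn "gst" s = true
        · simp only [h1, h2, h3, h4, List.find?, if_true, Bool.false_eq_true, if_false]; rfl
        · simp only [Bool.not_eq_true] at h4
          by_cases h5 : PySem.Str.isIn "udp" s = true
          · simp only [h1, h2, h3, h4, h5, List.find?, if_true, Bool.false_eq_true, if_false]; rfl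
          · simp only [Bool.not_eq_true] at h5
            by_cases h6 : PySem.Str.isIn "sult" s = true
            · simp only [h1, h2, h3, h4, h5, h6, List.find?, if_true, Bool.false_eq_true, if_false]; rfl
            · simp only [Bool.not_eq_true] at h6
              by_cases h7 : PySem.Str.isIn "comt" s = true
              · simp only [h1, h2, h3, h4, h5, h6, h7, List.find?, if_true, Bool.false_eq_true, if_false]
              · simp only [Bool.not_eq_true] at h7
                simp only [h1, h2, h3, h4, h5, h6, h7, List.find?, Bool.false_eq_true, if_false]

-- ===== VERDICT (by name: the statement is the Claim_ definition above) =====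
theorem curate_metxbiodb_for_enzyme_analysis_spec : Claim_equal_curate_metxbiodb_for_enzyme_analysis := by
  intro enzymes hd
  clear hd
  show curate_metxbiodb_for_enzyme_analysis enzymes = curate_metxbiodb_for_enzyme_analysis_alt enzymes
  induction enzymes with
  | nil => rfl
  | cons x xs ih =>
    show (pvStage "comt" "COMT" (pvStage "sult" "SULT" (pvStage "udp" "UDP" (pvStage "gst" "GST"
        (pvStage "ugt" "UGT" (pvStage "nat" "NAT" (pvStage "cyp" "CYP" x)))))))
        :: curate_metxbiodb_for_enzyme_analysis xs
      = pvNormalize x :: curate_metxbiodb_for_enzyme_analysis_alt xs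
    rw [pvPointwise x, ih]
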